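-- pv_equiv track=rewrite | github.com/kevin-perettimalaguti/runtrack-python | jour04/job14/main.py | decouper_chaine
-- ===== SOURCE A (Python) =====
-- def len_bis(lettres):
--     compteur = 0
--     for x in lettres:
--         compteur += 1
--     return compteur
--
-- def decouper_chaine(nb_lettre, phrase):
--     decoupe = []
--     debut = 0
--     longueur_chaine = len_bis(phrase)
--     nouvelle_phrase =""
--     i=0
--
--     while i < longueur_chaine:
--         if phrase[i] == " " or phrase[i] == ",":
--             decoupe += [phrase[debut:i]]
--             debut = i+1
--         i+=1
--     decoupe += [phrase[debut:]]
--
--     for i in decoupe: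
--         if len_bis(i) > nb_lettre:
--             nouvelle_phrase += i + " "
--     return nouvelle_phrase
-- ===== SOURCE B (Python) =====
-- def decouper_chaine(nb_lettre, phrase):
--     # Single streaming pass: split and filter at once, no index arithmetic,
--     # no intermediate list of words.
--     resultat = ""
--     mot = ""
--     for c in phrase:
--         if c == " " or c == ",":
--             if len(mot) > nb_lettre:
--                 resultat += mot + " "
--             mot = ""
--         else:
--             mot += c
--     if len(mot) > nb_lettre:
--         resultat += mot + " "
--     return resultat
-- ===== Notes on version B (the rewrite author's own statement) =====
-- stated objective: simpler
-- what changed: Replaces A's two-phase index/slice scan (build a list of word slices by index arithmetic, then a second filtering loop with a hand-rolled length counter) by one streaming character pass that accumulates the current word and appends it to the output as soon as a delimiter or the end is reached; no intermediate list, no indices, no slices.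
import Mathlib
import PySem

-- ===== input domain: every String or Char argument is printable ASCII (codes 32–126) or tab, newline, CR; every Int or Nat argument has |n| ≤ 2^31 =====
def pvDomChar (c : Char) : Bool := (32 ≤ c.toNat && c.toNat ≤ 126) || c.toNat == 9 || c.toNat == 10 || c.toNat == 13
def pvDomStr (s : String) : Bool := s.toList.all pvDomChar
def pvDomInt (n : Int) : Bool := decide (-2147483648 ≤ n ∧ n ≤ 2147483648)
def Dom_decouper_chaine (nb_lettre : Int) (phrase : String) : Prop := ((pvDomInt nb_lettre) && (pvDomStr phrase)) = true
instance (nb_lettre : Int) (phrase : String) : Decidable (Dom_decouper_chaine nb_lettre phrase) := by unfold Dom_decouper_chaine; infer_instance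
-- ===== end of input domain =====

-- B replaces A's two-phase index/slice split-then-filter by one streaming fold over the
-- characters that keeps each long word as soon as it is completed (simpler; same cost).


-- ===== PORT A =====
-- len_bis: A's hand-rolled length counter
def len_bis (l : List Char) : Int := l.foldl (fun compteur _ => compteur + 1) 0

-- literal port of A: the while loop over indices becomes a fold over List.range;
-- phrase[i] is PySem.List.pyGetD (the index is always in range), phrase[debut:i] / phrase[debut:] are PySem.List.slice
def decouper_chaine (nb_lettre : Int) (phrase : String) : String :=
  let cs := phrase.toList
  let longueur_chaine := (len_bis cs).toNat
  let st := (List.range longueur_chaine).foldl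
    (fun (st : List (List Char) × Nat) (i : Nat) =>
      if PySem.List.pyGetD cs (i : Int) ' ' = ' ' ∨ PySem.List.pyGetD cs (i : Int) ' ' = ',' then
        (st.1 ++ [PySem.List.slice cs (some (st.2 : Int)) (some (i : Int))], i + 1)
      else st) ([], 0)
  let decoupe := st.1 ++ [PySem.List.slice cs (some (st.2 : Int)) none]
  String.mk (decoupe.foldl
    (fun nouvelle_phrase w =>
      if len_bis w > nb_lettre then nouvelle_phrase ++ w ++ [' '] else nouvelle_phrase) [])

-- ===== PORT B =====
def decouper_chaine_alt (nb_lettre : Int) (phrase : String) : String :=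
  let r := phrase.toList.foldl
    (fun (st : List Char × List Char) c =>
      if c = ' ' ∨ c = ',' then
        ((if ((st.2.length : Int) > nb_lettre) then st.1 ++ st.2 ++ [' '] else st.1), [])
      else (st.1, st.2 ++ [c])) ([], [])
  String.mk (if ((r.2.length : Int) > nb_lettre) then r.1 ++ r.2 ++ [' '] else r.1)

-- ===== PRECONDITION & SPEC =====
def Spec_decouper_chaine (nb_lettre : Int) (phrase : String) (out : String) : Prop := out = decouper_chaine_alt nb_lettre phrase
instance (nb_lettre : Int) (phrase : String) (out : String) : Decidable (Spec_decouper_chaine nb_lettre phrase out) := by unfold Spec_decouper_chaine; infer_instance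

-- ===== CLAIM (what is proved, stated in full; the proofs are below) =====
def Claim_equal_decouper_chaine : Prop := ∀ (nb_lettre : Int) (phrase : String), Dom_decouper_chaine nb_lettre phrase → Spec_decouper_chaine nb_lettre phrase (decouper_chaine nb_lettre phrase)

-- ===== LEMMAS AND PROOFS =====

-- delimiter predicate shared by the analysis
def pvDelim (c : Char) : Bool := decide (c = ' ' ∨ c = ',')

-- the common value both programs compute: the long words of the split, each with a trailing space
def pvFJ (nb : Int) (ws : List (List Char)) : List Char :=
  ws.flatMap (fun w => if ((w.length : Int) > nb) then w ++ [' '] else [])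

theorem len_bis_eq (l : List Char) : len_bis l = (l.length : Int) := by
  have h : ∀ (l : List Char) (k : Int), l.foldl (fun compteur _ => compteur + 1) k = k + l.length := by
    intro l
    induction l with
    | nil => simp
    | cons a t ih => intro k; simp [List.foldl, ih]; ring
  simpa using h l 0

theorem pvFJ_fold (nb : Int) (ws : List (List Char)) (acc : List Char) :
    ws.foldl (fun acc w => if ((w.length : Int) > nb) then acc ++ w ++ [' '] else acc) acc
      = acc ++ pvFJ nb ws := by
  induction ws generalizing acc with
  | nil => simp [pvFJ]
  | cons w t ih =>
    rw [List.foldl_cons, ih]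
    simp only [pvFJ, List.flatMap_cons]
    by_cases h : ((w.length : Int) > nb) <;> simp [h]

theorem pvModifyHead_nil_append (l : List (List Char)) (h : l ≠ []) :
    l.modifyHead (fun w => [] ++ w) = l := by
  cases l with
  | nil => simp at h
  | cons a t => simp

-- proof-only shorthands for the two loop bodies (definitionally equal to the ports' lambdas)
def pvStepA (cs : List Char) (st : List (List Char) × Nat) (i : Nat) : List (List Char) × Nat :=
  if PySem.List.pyGetD cs (i : Int) ' ' = ' ' ∨ PySem.List.pyGetD cs (i : Int) ' ' = ',' then
    (st.1 ++ [PySem.List.slice cs (some (st.2 : Int)) (some (i : Int))], i + 1)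
  else st

def pvStepB (nb : Int) (st : List Char × List Char) (c : Char) : List Char × List Char :=
  if c = ' ' ∨ c = ',' then
    ((if ((st.2.length : Int) > nb) then st.1 ++ st.2 ++ [' '] else st.1), [])
  else (st.1, st.2 ++ [c])

-- A's splitting loop, characterised by an invariant over the remaining index range
theorem pvAloop (cs : List Char) :
    ∀ (k j d : Nat) (D : List (List Char)), d ≤ j → j + k = cs.length →
      ((List.range' j k).foldl (pvStepA cs) (D, d)).1
        ++ [List.drop (((List.range' j k).foldl (pvStepA cs) (D, d)).2) cs]
      = D ++ (List.splitOnP pvDelim (List.drop j cs)).modifyHead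
          (fun w => List.take (j - d) (List.drop d cs) ++ w) := by
  intro k
  induction k with
  | zero =>
    intro j d D hd hj
    simp only [List.range'_zero, List.foldl_nil]
    have hdrop : List.drop j cs = [] := List.drop_eq_nil_of_le (by omega)
    have hfull : List.take (j - d) (List.drop d cs) = List.drop d cs := by
      apply List.take_of_length_le
      simp [List.length_drop]; omega
    simp [hdrop, List.splitOnP_nil, hfull]
  | succ k ih =>
    intro j d D hd hj
    have hjlt : j < cs.length := by omega
    have hget : PySem.List.pyGetD cs (j : Int) ' ' = cs[j] := by
      rw [PySem.List.pyGetD_natCast]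
      exact List.getD_eq_getElem cs ' ' hjlt
    have hdropj : List.drop j cs = cs[j] :: List.drop (j + 1) cs :=
      List.drop_eq_getElem_cons hjlt
    rw [List.range'_succ]
    simp only [List.foldl_cons]
    by_cases hc : PySem.List.pyGetD cs (j : Int) ' ' = ' ' ∨ PySem.List.pyGetD cs (j : Int) ' ' = ','
    · -- delimiter at j: flush the current slice
      have hp : pvDelim cs[j] = true := by
        simp only [pvDelim, decide_eq_true_eq]
        rw [hget] at hc; exact hc
      rw [show pvStepA cs (D, d) j
            = (D ++ [PySem.List.slice cs (some (d : Int)) (some (j : Int))], j + 1) by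
          simp only [pvStepA]; rw [if_pos hc]]
      rw [ih (j + 1) (j + 1) (D ++ [PySem.List.slice cs (some (d : Int)) (some (j : Int))])
        (le_refl _) (by omega)]
      rw [hdropj, List.splitOnP_cons, if_pos hp]
      have hne := List.splitOnP_ne_nil pvDelim (List.drop (j + 1) cs)
      simp only [Nat.sub_self, List.take_zero]
      rw [pvModifyHead_nil_append _ hne, List.modifyHead_cons]
      rw [PySem.List.slice_natCast]
      simp
    · -- ordinary character at j: it joins the current word
      have hp : pvDelim cs[j] = false := by
        simp only [pvDelim, decide_eq_false_iff_not]
        rw [hget] at hc; exact hc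
      rw [show pvStepA cs (D, d) j = (D, d) by simp only [pvStepA]; rw [if_neg hc]]
      rw [ih (j + 1) d D (by omega) (by omega)]
      rw [hdropj, List.splitOnP_cons, hp]
      simp only [Bool.false_eq_true, if_false]
      rw [List.modifyHead_modifyHead]
      have hfun : (fun w => List.take (j + 1 - d) (List.drop d cs) ++ w)
          = ((fun w => List.take (j - d) (List.drop d cs) ++ w) ∘ List.cons cs[j]) := by
        funext w
        have h1 : j + 1 - d = (j - d) + 1 := by omega
        have h2 : (List.drop d cs)[j - d]? = some cs[j] := by
          rw [List.getElem?_drop]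
          have h3 : d + (j - d) = j := by omega
          rw [h3]
          exact List.getElem?_eq_getElem hjlt
        simp [h1, List.take_add_one, h2, Function.comp]
      rw [hfun]

-- B's fold, characterised directly by structural induction on the characters
theorem pvBloop (nb : Int) (cs : List Char) :
    ∀ (out mot : List Char),
      (if (((cs.foldl (pvStepB nb) (out, mot)).2.length : Int) > nb)
       then (cs.foldl (pvStepB nb) (out, mot)).1
            ++ (cs.foldl (pvStepB nb) (out, mot)).2 ++ [' ']
       else (cs.foldl (pvStepB nb) (out, mot)).1)
      = out ++ pvFJ nb ((List.splitOnP pvDelim cs).modifyHead (fun w => mot ++ w)) := by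
  induction cs with
  | nil =>
    intro out mot
    simp only [List.foldl_nil, List.splitOnP_nil, List.modifyHead_cons]
    by_cases h : ((mot.length : Int) > nb) <;> simp [h, pvFJ]
  | cons c t ih =>
    intro out mot
    simp only [List.foldl_cons]
    by_cases hc : c = ' ' ∨ c = ','
    · have hp : pvDelim c = true := by simp [pvDelim, hc]
      rw [show pvStepB nb (out, mot) c
            = ((if ((mot.length : Int) > nb) then out ++ mot ++ [' '] else out), []) by
          simp [pvStepB, hc]]
      rw [ih]
      rw [List.splitOnP_cons, if_pos hp, List.modifyHead_cons]
      have hne := List.splitOnP_ne_nil pvDelim t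
      rw [pvModifyHead_nil_append _ hne]
      by_cases h : ((mot.length : Int) > nb) <;> simp [h, pvFJ]
    · have hp : pvDelim c = false := by simp [pvDelim, hc]
      rw [show pvStepB nb (out, mot) c = (out, mot ++ [c]) by simp [pvStepB, hc]]
      rw [ih]
      rw [List.splitOnP_cons, hp]
      simp only [Bool.false_eq_true, if_false]
      rw [List.modifyHead_modifyHead]
      have hfun : (fun w => mot ++ [c] ++ w) = ((fun w => mot ++ w) ∘ List.cons c) := by
        funext w; simp [Function.comp]
      rw [hfun]

-- ===== VERDICT (by name: the statement is the Claim_ definition above) =====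
theorem decouper_chaine_spec : Claim_equal_decouper_chaine := by
  intro nb phrase _
  unfold Spec_decouper_chaine decouper_chaine decouper_chaine_alt
  dsimp only
  set cs := phrase.toList with hcs
  -- the ports' inline loop bodies are the step functions
  have eA : (fun (st : List (List Char) × Nat) (i : Nat) =>
      if PySem.List.pyGetD cs (i : Int) ' ' = ' ' ∨ PySem.List.pyGetD cs (i : Int) ' ' = ',' then
        (st.1 ++ [PySem.List.slice cs (some (st.2 : Int)) (some (i : Int))], i + 1)
      else st) = pvStepA cs := rfl
  have eB : (fun (st : List Char × List Char) (c : Char) =>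
      if c = ' ' ∨ c = ',' then
        ((if ((st.2.length : Int) > nb) then st.1 ++ st.2 ++ [' '] else st.1), [])
      else (st.1, st.2 ++ [c])) = pvStepB nb := rfl
  rw [eA, eB, len_bis_eq, Int.toNat_natCast, List.range_eq_range']
  have hA := pvAloop cs cs.length 0 0 [] (le_refl 0) (by omega)
  simp only [Nat.sub_self, List.take_zero, List.drop_zero, List.nil_append] at hA
  rw [show (fun (w : List Char) => w) = id from rfl, List.modifyHead_id] at hA
  have hB := pvBloop nb cs [] []
  rw [pvModifyHead_nil_append _ (List.splitOnP_ne_nil pvDelim cs)] at hB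
  simp only [List.nil_append] at hB
  rw [hB]
  congr 1
  rw [show PySem.List.slice cs (some (((List.range' 0 cs.length).foldl (pvStepA cs) ([], 0)).2 : Int)) none
        = List.drop (((List.range' 0 cs.length).foldl (pvStepA cs) ([], 0)).2) cs
      from PySem.List.slice_from_natCast cs _]
  rw [hA]
  rw [show (fun (nouvelle_phrase w : List Char) =>
        if len_bis w > nb then nouvelle_phrase ++ w ++ [' '] else nouvelle_phrase)
      = (fun (nouvelle_phrase w : List Char) =>
        if ((w.length : Int) > nb) then nouvelle_phrase ++ w ++ [' '] else nouvelle_phrase) by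
    funext a w; rw [len_bis_eq]]
  exact pvFJ_fold nb _ []
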